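-- pv_equiv track=rewrite | github.com/constellation99/bp | rmm_tree.py | build_summaries
-- ===== SOURCE A (Python) =====
-- def build_summaries(block):
--     """
--     Compute (e, m, M, n) summary for a block of booleans:
--       e = total excess (+1 for True, -1 for False)
--       m = minimum prefix excess within the block
--       M = maximum prefix excess within the block
--       n = count of prefixes attaining m
--     """
--     length = len(block)
--     if length == 0:
--         return 0, 0, 0, 0
--     e = 0
--     m = length
--     M = -length
--     n = 0
--     for bit in block:
--         e += 1 if bit else -1
--         if e < m:
--             m = e
--             n = 1
--         elif e == m:
--             n += 1
--         if e > M: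
--             M = e
--     return e, m, M, n
-- ===== SOURCE B (Python) =====
-- def build_summaries(block):
--     if len(block) == 0:
--         return 0, 0, 0, 0
--     prefixes = []
--     e = 0
--     for bit in block:
--         e += 1 if bit else -1
--         prefixes.append(e)
--     m = min(prefixes)
--     M = max(prefixes)
--     return prefixes[-1], m, M, prefixes.count(m)
-- ===== Notes on version B (the rewrite author's own statement) =====
-- stated objective: simpler
-- what changed: Replaces the single fused accumulation loop maintaining four interacting variables (with sentinel initialisations m=len, M=-len) by building the prefix-excess table once and then taking last/min/max/count of it with the builtins.
import Mathlib
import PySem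

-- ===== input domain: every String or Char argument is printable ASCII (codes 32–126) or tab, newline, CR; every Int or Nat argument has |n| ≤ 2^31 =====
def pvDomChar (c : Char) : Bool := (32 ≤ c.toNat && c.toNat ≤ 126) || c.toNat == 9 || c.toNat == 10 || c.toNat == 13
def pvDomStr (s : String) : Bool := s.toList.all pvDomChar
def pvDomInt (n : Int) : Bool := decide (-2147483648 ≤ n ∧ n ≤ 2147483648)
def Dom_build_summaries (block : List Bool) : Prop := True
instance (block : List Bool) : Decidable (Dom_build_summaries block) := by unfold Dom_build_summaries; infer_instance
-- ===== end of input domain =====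

-- B replaces A's fused four-variable accumulation loop by building the prefix-excess
-- table once and taking last/min/max/count of it (objective: simpler decomposition).

-- ===== PORT A =====
-- one loop iteration of A: update e, then (m, n), then M, in A's branch order
def pvStepA (st : Int × Int × Int × Int) (bit : Bool) : Int × Int × Int × Int :=
  let e := st.1 + (if bit then 1 else -1)
  let mn := if e < st.2.1 then (e, (1 : Int))
            else if e = st.2.1 then (st.2.1, st.2.2.2 + 1)
            else (st.2.1, st.2.2.2)
  let M := if e > st.2.2.1 then e else st.2.2.1
  (e, mn.1, M, mn.2)

def build_summaries (block : List Bool) : Int × Int × Int × Int :=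
  let length : Int := block.length
  if block.length = 0 then (0, 0, 0, 0)
  else block.foldl pvStepA (0, length, -length, 0)

-- ===== PORT B =====
-- the prefix-excess table (Source B's append loop, excluding the initial 0)
def pvPrefs (e : Int) (l : List Bool) : List Int :=
  match l with
  | [] => []
  | b :: t =>
    let e1 := e + (if b then 1 else -1)
    e1 :: pvPrefs e1 t

def build_summaries_alt (block : List Bool) : Int × Int × Int × Int :=
  if block.length = 0 then (0, 0, 0, 0)
  else
    let prefixes := pvPrefs 0 block
    let m := (PySem.List.min? prefixes (fun x => x)).getD 0
    let M := (PySem.List.max? prefixes (fun x => x)).getD 0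
    ((prefixes.getLast?).getD 0, m, M, (prefixes.count m : Int))

-- ===== PRECONDITION & SPEC =====
def Spec_build_summaries (block : List Bool) (out : Int × Int × Int × Int) : Prop := out = build_summaries_alt block
instance (block : List Bool) (out : Int × Int × Int × Int) : Decidable (Spec_build_summaries block out) := by unfold Spec_build_summaries; infer_instance

-- ===== CLAIM (what is proved, stated in full; the proofs are below) =====
def Claim_equal_build_summaries : Prop := ∀ (block : List Bool), Dom_build_summaries block → Spec_build_summaries block (build_summaries block)

-- ===== LEMMAS AND PROOFS =====

theorem pvFoldlMin_le (l : List Int) (a : Int) : l.foldl min a ≤ a := by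
  induction l generalizing a with
  | nil => simp
  | cons x t ih => exact le_trans (ih (min a x)) (min_le_left a x)

-- A's loop from any state equals last / running-min / running-max / count-of-min of the prefix table
theorem pvLoopA_eq (t : List Bool) (e0 m0 M0 n0 : Int) :
    t.foldl pvStepA (e0, m0, M0, n0) =
      ((pvPrefs e0 t).getLast?.getD e0,
       (pvPrefs e0 t).foldl min m0,
       (pvPrefs e0 t).foldl max M0,
       (if (pvPrefs e0 t).foldl min m0 < m0 then 0 else n0)
         + ((pvPrefs e0 t).count ((pvPrefs e0 t).foldl min m0) : Int)) := by
  induction t generalizing e0 m0 M0 n0 with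
  | nil => simp [pvPrefs]
  | cons b rest ih =>
    set e1 : Int := e0 + (if b then 1 else -1) with he1
    have hstep : pvStepA (e0, m0, M0, n0) b =
        (e1, min m0 e1, max M0 e1,
          if e1 < m0 then (1 : Int) else if e1 = m0 then n0 + 1 else n0) := by
      simp only [pvStepA, ← he1]
      by_cases h1 : e1 < m0 <;> by_cases h2 : e1 = m0 <;>
        simp [h1, h2, min_def, max_def] <;> omega
    have hp : pvPrefs e0 (b :: rest) = e1 :: pvPrefs e1 rest := by
      simp [pvPrefs, ← he1]
    rw [List.foldl_cons, hstep, ih, hp]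
    set ps := pvPrefs e1 rest with hps
    set m' := ps.foldl min (min m0 e1) with hm'
    have hmle : m' ≤ min m0 e1 := pvFoldlMin_le ps (min m0 e1)
    refine Prod.ext ?_ (Prod.ext ?_ (Prod.ext ?_ ?_))
    · cases ps with
      | nil => simp
      | cons y ys => simp [List.getLast?_cons]
    · simp [List.foldl_cons, ← hm']
    · simp [List.foldl_cons]
    · have hfold : (e1 :: ps).foldl min m0 = m' := by
        simp [List.foldl_cons, hm']
      rw [hfold]
      have hcnt : ((e1 :: ps).count m' : Int) =
          (if e1 = m' then 1 else 0) + (ps.count m' : Int) := by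
        by_cases h : e1 = m' <;> simp [h, eq_comm] <;> push_cast <;> ring
      rw [hcnt]
      by_cases h : e1 = m' <;> simp [h] <;> split_ifs <;> omega

-- ===== VERDICT (by name: the statement is the Claim_ definition above) =====
theorem build_summaries_spec : Claim_equal_build_summaries := by
  unfold Claim_equal_build_summaries
  intro block _
  unfold Spec_build_summaries
  cases block with
  | nil => rfl
  | cons b rest =>
    unfold build_summaries build_summaries_alt
    simp only [List.length_cons, pvLoopA_eq, Nat.succ_ne_zero, if_false, ite_false,
      Nat.add_one_ne_zero, if_neg (Nat.succ_ne_zero rest.length)]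
    have hp : pvPrefs 0 (b :: rest) = (if b then (1 : Int) else -1) :: pvPrefs (if b then (1 : Int) else -1) rest := by
      simp [pvPrefs]
    set x : Int := if b then 1 else -1 with hx
    set ps := pvPrefs x rest with hps
    have hxb : -1 ≤ x ∧ x ≤ 1 := by by_cases h : b <;> simp [hx, h]
    have hL : (1 : Int) ≤ (rest.length : Int) + 1 := by omega
    have hmin : (x :: ps).foldl min ((rest.length : Int) + 1) = ps.foldl min x := by
      have : min ((rest.length : Int) + 1) x = x := by omega
      simp [List.foldl_cons, this]
    have hmax : (x :: ps).foldl max (-((rest.length : Int) + 1)) = ps.foldl max x := by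
      have h : max (-1 + -(rest.length : Int)) x = x := by omega
      simp [List.foldl_cons, h]
    have hminB : (PySem.List.min? (x :: ps) (fun y => y)).getD 0 = ps.foldl min x := by
      rw [PySem.List.min?_id_cons]; rfl
    have hmaxB : (PySem.List.max? (x :: ps) (fun y => y)).getD 0 = ps.foldl max x := by
      rw [PySem.List.max?_id_cons]; rfl
    simp only [hp, ← hps, Nat.cast_add, Nat.cast_one] at *
    rw [hmin, hmax, hminB, hmaxB]
    refine Prod.ext ?_ (Prod.ext rfl (Prod.ext rfl ?_))
    · cases ps with
      | nil => simp
      | cons y ys => simp [List.getLast?_cons]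
    · simp
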